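-- pv_equiv track=rewrite | github.com/oscarm3l1n/advent-of-code | 2023/d1/main.py | get_index_of_numbers
-- ===== SOURCE A (Python) =====
-- def get_index_of_numbers(line):
--     fptr = 0
--     bptr = len(line) - 1
--     i1, i2 = None, None
--     while True:
--         if fptr >= len(line):
--             return None, None
--         if i1 is None:
--             v1 = line[fptr]
--             if v1.isdigit():
--                 i1 = fptr
--             fptr += 1
--         if i2 is None:
--             v2 = line[bptr]
--             if v2.isdigit():
--                 i2 = bptr
--             bptr -= 1
--
--         if all([i1 is not None, i2 is not None]):
--             break
--     return i1, i2
-- ===== SOURCE B (Python) =====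
-- def get_index_of_numbers(line):
--     i1 = next((i for i, c in enumerate(line) if c.isdigit()), None)
--     i2 = next((i for i in range(len(line) - 1, -1, -1) if line[i].isdigit()), None)
--     return i1, i2
-- ===== Notes on version B (the rewrite author's own statement) =====
-- stated objective: simpler
-- what changed: Replaces the interleaved two-pointer while-loop carrying four mutable state variables by two independent directional scans: a forward scan for the first digit index and a backward scan for the last digit index, each defaulting to None.
import Mathlib
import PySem

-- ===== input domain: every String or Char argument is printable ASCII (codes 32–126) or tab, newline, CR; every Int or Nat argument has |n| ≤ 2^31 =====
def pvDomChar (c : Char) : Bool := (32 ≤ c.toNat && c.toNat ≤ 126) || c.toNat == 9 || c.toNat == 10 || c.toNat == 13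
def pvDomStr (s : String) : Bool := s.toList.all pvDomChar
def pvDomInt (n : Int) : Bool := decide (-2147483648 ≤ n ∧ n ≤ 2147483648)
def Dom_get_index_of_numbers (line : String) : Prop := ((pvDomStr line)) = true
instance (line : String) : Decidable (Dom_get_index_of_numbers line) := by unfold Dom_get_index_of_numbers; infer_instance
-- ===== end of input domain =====

-- B replaces A's interleaved two-pointer while-loop by two independent directional scans
-- (forward for the first digit index, backward for the last); objective: simpler.

-- ===== PORT A =====
-- A's while-loop: state (fptr, bptr, i1, i2); each iteration first checks fptr >= len(line),
-- then, while i1 is unset, tests line[fptr] and advances fptr, and while i2 is unset,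
-- tests line[bptr] and decrements bptr; it breaks when both are set.
def pvLoopA (cs : List Char) (fptr bptr : Int) (i1 i2 : Option Int) : Option Int × Option Int :=
  if (cs.length : Int) ≤ fptr then (none, none)
  else
    match i1, i2 with
    | none, none =>
        let i1' := if (PySem.List.pyGet? cs fptr).any PySem.Chars.isdigit then some fptr else none
        let i2' := if (PySem.List.pyGet? cs bptr).any PySem.Chars.isdigit then some bptr else none
        if i1'.isSome && i2'.isSome then (i1', i2')
        else pvLoopA cs (fptr + 1) (bptr - 1) i1' i2'
    | none, some q =>
        if (PySem.List.pyGet? cs fptr).any PySem.Chars.isdigit then (some fptr, some q)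
        else pvLoopA cs (fptr + 1) bptr none (some q)
    | some p, none =>
        if (PySem.List.pyGet? cs bptr).any PySem.Chars.isdigit then (some p, some bptr)
        else if bptr - 1 < 0 then (some p, none)
        else pvLoopA cs fptr (bptr - 1) (some p) none
    | some p, some q => (some p, some q)
termination_by (if i1 = none then ((cs.length : Int) - fptr).toNat else 0)
             + (if i2 = none then (bptr + 1).toNat else 0)
decreasing_by
  all_goals (split_ifs at * <;> simp_all <;> omega)

-- phase 2

def get_index_of_numbers (line : String) : Option Int × Option Int :=
  pvLoopA line.toList 0 ((PySem.Str.len line : Int) - 1) none none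

-- ===== PORT B =====
-- B: next() over enumerate for the first digit index; next() over range(len-1, -1, -1) for the last.
def get_index_of_numbers_alt (line : String) : Option Int × Option Int :=
  let cs := line.toList
  let i1 := ((PySem.List.enumerate cs 0).find? (fun p => PySem.Chars.isdigit p.2)).map (·.1)
  let i2 := (PySem.List.pyRange ((PySem.Str.len line : Int) - 1) (-1) (-1)).find?
              (fun i => (PySem.List.pyGet? cs i).any PySem.Chars.isdigit)
  (i1, i2)

-- ===== PRECONDITION & SPEC =====
def Spec_get_index_of_numbers (line : String) (out : Option Int × Option Int) : Prop := out = get_index_of_numbers_alt line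
instance (line : String) (out : Option Int × Option Int) : Decidable (Spec_get_index_of_numbers line out) := by unfold Spec_get_index_of_numbers; infer_instance

-- ===== CLAIM (what is proved, stated in full; the proofs are below) =====
def Claim_equal_get_index_of_numbers : Prop := ∀ (line : String), Dom_get_index_of_numbers line → Spec_get_index_of_numbers line (get_index_of_numbers line)

-- ===== LEMMAS AND PROOFS =====

def pvDig (cs : List Char) (i : Nat) : Bool := PySem.Chars.isdigit (cs.getD i ' ')

def pvFirst (cs : List Char) (k : Nat) : Option Nat :=
  if h : k < cs.length then (if pvDig cs k then some k else pvFirst cs (k + 1)) else none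
termination_by cs.length - k

def pvLast (cs : List Char) : Nat → Option Nat
  | 0 => none
  | j + 1 => if pvDig cs j then some j else pvLast cs j

lemma pvDig_lt {cs : List Char} {i : Nat} (h : pvDig cs i = true) : i < cs.length := by
  by_contra hge
  rw [Nat.not_lt] at hge
  rw [pvDig, List.getD_eq_default _ _ hge] at h
  exact absurd h (by decide)

lemma pvDig_eq {cs : List Char} {i : Nat} (h : i < cs.length) :
    pvDig cs i = PySem.Chars.isdigit cs[i] := by
  simp [pvDig, List.getD_eq_getElem?_getD, List.getElem?_eq_getElem h]

lemma pvFirst_none {cs : List Char} {k : Nat} (h : cs.length ≤ k) : pvFirst cs k = none := by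
  rw [pvFirst]; simp [Nat.not_lt.mpr h]

lemma pvFirst_skip {cs : List Char} {k : Nat} (h : pvDig cs k = false) :
    pvFirst cs k = pvFirst cs (k + 1) := by
  by_cases hk : k < cs.length
  · rw [pvFirst]; simp [hk, h]
  · rw [pvFirst_none (by omega), pvFirst_none (by omega)]

lemma pvFirst_found {cs : List Char} {k : Nat} (h : pvDig cs k = true) :
    pvFirst cs k = some k := by
  rw [pvFirst]; simp [pvDig_lt h, h]

lemma pvFirst_congr {cs : List Char} (k : Nat) (h : ∀ i, i < k → pvDig cs i = false) :
    pvFirst cs 0 = pvFirst cs k := by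
  induction k with
  | zero => rfl
  | succ k ih => rw [ih (fun i hi => h i (by omega)), pvFirst_skip (h k (by omega))]

lemma pvLast_skip {cs : List Char} {j : Nat} (h : pvDig cs j = false) :
    pvLast cs (j + 1) = pvLast cs j := by
  simp [pvLast, h]

lemma pvLast_found {cs : List Char} {j : Nat} (h : pvDig cs j = true) :
    pvLast cs (j + 1) = some j := by
  simp [pvLast, h]

lemma pvLast_congr {cs : List Char} {j m : Nat} (hjm : j ≤ m)
    (h : ∀ i, j ≤ i → pvDig cs i = false) : pvLast cs m = pvLast cs j := by
  obtain ⟨d, rfl⟩ : ∃ d, m = j + d := ⟨m - j, by omega⟩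
  clear hjm
  induction d with
  | zero => rfl
  | succ d ih =>
      rw [show j + (d + 1) = (j + d) + 1 by omega, pvLast_skip (h _ (by omega))]
      exact ih

lemma pvPhase2 (cs : List Char) (m : Nat) : ∀ (f : Nat) (b q : Int),
    cs.length - f ≤ m →
    (∃ d, f ≤ d ∧ pvDig cs d = true) →
    pvLoopA cs (f : Int) b none (some q)
      = ((pvFirst cs f).map (fun j => (j : Int)), some q) := by
  induction m with
  | zero =>
      intro f b q hm ⟨d, hfd, hd⟩
      have := pvDig_lt hd; omega
  | succ m ih =>
      intro f b q hm ⟨d, hfd, hd⟩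
      have hdn := pvDig_lt hd
      have hf : f < cs.length := by omega
      rw [pvLoopA]
      have hguard : ¬ ((cs.length : Int) ≤ (f : Int)) := by exact_mod_cast Nat.not_le.mpr hf
      simp only [if_neg hguard]
      have hget : PySem.List.pyGet? cs (f : Int) = some cs[f] := by
        simp [hf]
      by_cases hdig : pvDig cs f = true
      · rw [pvDig_eq hf] at hdig
        simp [hget, hdig, pvFirst_found (by rwa [pvDig_eq hf])]
      · rw [Bool.not_eq_true, pvDig_eq hf] at hdig
        simp only [hget, Option.any_some, hdig, Bool.false_eq_true, if_false]
        have hm' : cs.length - (f + 1) ≤ m := by omega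
        have hskip : pvFirst cs f = pvFirst cs (f + 1) :=
          pvFirst_skip (by rw [pvDig_eq hf]; exact hdig)
        rw [show (f : Int) + 1 = ((f + 1 : Nat) : Int) by push_cast; ring]
        have hfd' : f + 1 ≤ d := by
          rcases Nat.lt_or_ge f d with h | h
          · omega
          · have hdf : d = f := by omega
            rw [hdf, pvDig_eq hf] at hd
            rw [hd] at hdig
            exact absurd hdig (by simp)
        rw [ih (f + 1) b q hm' ⟨d, hfd', hd⟩, ← hskip]

-- phase 1
lemma pvPhase1 (cs : List Char) : ∀ (b : Nat) (p : Nat) (f : Int),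
    f < (cs.length : Int) →
    b < cs.length →
    pvDig cs p = true → p ≤ b →
    (∀ i, b < i → pvDig cs i = false) →
    pvLoopA cs f (b : Int) (some (p : Int)) none
      = (some (p : Int), (pvLast cs (b + 1)).map (fun j => (j : Int))) := by
  intro b
  induction b with
  | zero =>
      intro p f hf hb hp hpb hsuf
      have hp0 : p = 0 := by omega
      subst hp0
      rw [pvLoopA]
      simp only [if_neg (not_le.mpr hf)]
      have hget : PySem.List.pyGet? cs ((0 : Nat) : Int) = some cs[0] := by simp [hb]
      have hd0 : PySem.Chars.isdigit cs[0] = true := by rwa [pvDig_eq hb] at hp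
      simp only [Nat.cast_zero] at hget
      simp [hget, hd0, pvLast_found hp]
  | succ b ih =>
      intro p f hf hb hp hpb hsuf
      rw [pvLoopA]
      simp only [if_neg (not_le.mpr hf)]
      have hget : PySem.List.pyGet? cs (((b : Nat) : Int) + 1) = some cs[b + 1] := by
        rw [show (((b : Nat) : Int) + 1) = ((b + 1 : Nat) : Int) by push_cast; ring,
          PySem.List.pyGet?_natCast]
        simp [hb]
      by_cases hdig : pvDig cs (b + 1) = true
      · have h2 : PySem.Chars.isdigit cs[b + 1] = true := by rwa [pvDig_eq hb] at hdig
        simp [hget, h2, pvLast_found hdig]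
      · rw [Bool.not_eq_true] at hdig
        have h2 : PySem.Chars.isdigit cs[b + 1] = false := by rwa [pvDig_eq hb] at hdig
        have hpb' : p ≤ b := by
          rcases Nat.lt_or_ge p (b + 1) with h | h
          · omega
          · exfalso
            have hpe : p = b + 1 := by omega
            rw [hpe] at hp
            rw [hp] at hdig
            exact absurd hdig (by simp)
        push_cast
        simp only [hget, Option.any_some, h2, Bool.false_eq_true, if_false]
        have hneg : ¬ ((((b : Nat) : Int) + 1) - 1 < 0) := by omega
        simp only [if_neg hneg]
        rw [show (((b : Nat) : Int) + 1) - 1 = ((b : Nat) : Int) by ring]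
        rw [ih p f hf (by omega) hp hpb'
              (by intro i hi
                  by_cases hc : i = b + 1
                  · subst hc; exact hdig
                  · exact hsuf i (by omega))]
        rw [← pvLast_skip hdig]

-- phase 0
lemma pvPhase0 (cs : List Char) (m : Nat) : ∀ (k : Nat),
    k ≤ cs.length → cs.length - k ≤ m →
    (∀ i, i < k → pvDig cs i = false) →
    (∀ i, cs.length - k ≤ i → pvDig cs i = false) →
    pvLoopA cs (k : Int) ((cs.length : Int) - 1 - (k : Int)) none none
      = ((pvFirst cs 0).map (fun j => (j : Int)),
         (pvLast cs cs.length).map (fun j => (j : Int))) := by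
  induction m with
  | zero =>
      intro k hkn hm hpre hsuf
      have hk : k = cs.length := by omega
      subst hk
      rw [pvLoopA]
      simp only [if_pos (by omega : (cs.length : Int) ≤ ((cs.length : Nat) : Int))]
      have hall : ∀ i, pvDig cs i = false := by
        intro i
        by_cases h : i < cs.length
        · exact hpre i h
        · by_contra hd
          simp only [Bool.not_eq_false] at hd
          exact absurd (pvDig_lt hd) h
      rw [pvFirst_congr cs.length (fun i _ => hall i), pvFirst_none (le_refl _),
          pvLast_congr (Nat.zero_le _) (fun i _ => hall i)]
      rfl
  | succ m ih =>
      intro k hkn hm hpre hsuf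
      by_cases hk : k < cs.length
      case neg =>
        have hk' : k = cs.length := by omega
        subst hk'
        exact ih cs.length (le_refl _) (by omega) hpre hsuf
      rw [pvLoopA]
      have hguard : ¬ ((cs.length : Int) ≤ (k : Int)) := by exact_mod_cast Nat.not_le.mpr hk
      simp only [if_neg hguard]
      set n := cs.length with hn
      have hbn : n - 1 - k < n := by omega
      have hgetf : PySem.List.pyGet? cs (k : Int) = some cs[k] := by simp [hk]
      rw [show (n : Int) - 1 - (k : Int) = ((n - 1 - k : Nat) : Int) by omega]
      have hgetb : PySem.List.pyGet? cs ((n - 1 - k : Nat) : Int) = some cs[n - 1 - k] := by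
        rw [PySem.List.pyGet?_natCast]; simp [hbn]
      by_cases hdf : pvDig cs k = true <;> by_cases hdb : pvDig cs (n - 1 - k) = true
      · -- both found this iteration: break with (k, n - 1 - k)
        have h1 : PySem.Chars.isdigit cs[k] = true := by rwa [pvDig_eq hk] at hdf
        have h2 : PySem.Chars.isdigit cs[n - 1 - k] = true := by rwa [pvDig_eq hbn] at hdb
        simp only [hgetf, hgetb, Option.any_some, h1, h2, if_pos, Option.isSome_some,
          Bool.and_self, if_true]
        rw [pvFirst_congr k hpre, pvFirst_found hdf,
            pvLast_congr (show n - k ≤ n by omega) hsuf,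
            show n - k = (n - 1 - k) + 1 by omega, pvLast_found hdb]
        rfl
      · -- forward found, backward not: enter phase 1
        rw [Bool.not_eq_true] at hdb
        have h1 : PySem.Chars.isdigit cs[k] = true := by rwa [pvDig_eq hk] at hdf
        have h2 : PySem.Chars.isdigit cs[n - 1 - k] = false := by rwa [pvDig_eq hbn] at hdb
        have h2k : k < n - k := by
          by_contra hc
          rw [hsuf k (by omega)] at hdf
          exact absurd hdf (by simp)
        have hne : k ≠ n - 1 - k := by
          intro h
          rw [← h] at hdb
          rw [hdf] at hdb
          exact absurd hdb (by simp)
        have hklt : k < n - 1 - k := by omega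
        simp only [hgetf, hgetb, Option.any_some, h1, h2, Bool.false_eq_true, if_true, if_false,
          Option.isSome_some, Option.isSome_none, Bool.and_false]
        rw [show ((n - 1 - k : Nat) : Int) - 1 = ((n - 2 - k : Nat) : Int) by omega]
        rw [pvPhase1 cs (n - 2 - k) k ((k : Int) + 1)
              (by omega) (by omega) hdf (by omega)
              (by intro i hi
                  by_cases hc : i = n - 1 - k
                  · subst hc; exact hdb
                  · exact hsuf i (by omega))]
        rw [pvFirst_congr k hpre, pvFirst_found hdf]
        rw [pvLast_congr (show n - 1 - k ≤ n by omega)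
              (by intro i hi
                  by_cases hc : i = n - 1 - k
                  · subst hc; exact hdb
                  · exact hsuf i (by omega)),
            show n - 2 - k + 1 = n - 1 - k by omega]
        simp
      · -- backward found, forward not: enter phase 2
        rw [Bool.not_eq_true] at hdf
        have h1 : PySem.Chars.isdigit cs[k] = false := by rwa [pvDig_eq hk] at hdf
        have h2 : PySem.Chars.isdigit cs[n - 1 - k] = true := by rwa [pvDig_eq hbn] at hdb
        have hklt : k < n - 1 - k := by
          by_contra hc
          rcases Nat.lt_or_ge (n - 1 - k) k with h | h
          · rw [hpre (n - 1 - k) h] at hdb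
            exact absurd hdb (by simp)
          · have : n - 1 - k = k := by omega
            rw [this, hdf] at hdb
            exact absurd hdb (by simp)
        simp only [hgetf, hgetb, Option.any_some, h1, h2, Bool.false_eq_true, if_false, if_true,
          Option.isSome_none, Bool.false_and]
        rw [show (k : Int) + 1 = ((k + 1 : Nat) : Int) by omega]
        rw [pvPhase2 cs n (k + 1) (((n - 1 - k : Nat) : Int) - 1) ((n - 1 - k : Nat) : Int)
              (by omega) ⟨n - 1 - k, by omega, hdb⟩]
        rw [pvFirst_congr (k + 1)
              (by intro i hi
                  by_cases hc : i = k
                  · subst hc; exact hdf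
                  · exact hpre i (by omega))]
        rw [pvLast_congr (show n - k ≤ n by omega) hsuf,
            show n - k = (n - 1 - k) + 1 by omega, pvLast_found hdb]
        rfl
      · -- neither found: continue phase 0 at k + 1
        rw [Bool.not_eq_true] at hdf hdb
        have h1 : PySem.Chars.isdigit cs[k] = false := by rwa [pvDig_eq hk] at hdf
        have h2 : PySem.Chars.isdigit cs[n - 1 - k] = false := by rwa [pvDig_eq hbn] at hdb
        simp only [hgetf, hgetb, Option.any_some, h1, h2, Bool.false_eq_true, if_false,
          Option.isSome_none, Bool.false_and]
        rw [show (k : Int) + 1 = ((k + 1 : Nat) : Int) by omega,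
            show ((n - 1 - k : Nat) : Int) - 1 = (n : Int) - 1 - ((k + 1 : Nat) : Int) by omega]
        exact ih (k + 1) (by omega) (by omega)
          (by intro i hi
              by_cases hc : i = k
              · subst hc; exact hdf
              · exact hpre i (by omega))
          (by intro i hi
              by_cases hc : i = n - 1 - k
              · subst hc; exact hdb
              · exact hsuf i (by omega))

lemma pvAltFirst (cs : List Char) (m : Nat) : ∀ (k : Nat), cs.length - k ≤ m →
    ((PySem.List.enumerate (cs.drop k) (k : Int)).find?
        (fun p => PySem.Chars.isdigit p.2)).map (·.1)
      = (pvFirst cs k).map (fun j => (j : Int)) := by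
  induction m with
  | zero =>
      intro k hm
      rw [List.drop_eq_nil_of_le (by omega), pvFirst_none (by omega)]
      simp [PySem.List.enumerate_nil]
  | succ m ih =>
      intro k hm
      by_cases hk : k < cs.length
      case neg =>
        rw [List.drop_eq_nil_of_le (by omega), pvFirst_none (by omega)]
        simp [PySem.List.enumerate_nil]
      rw [List.drop_eq_getElem_cons hk, PySem.List.enumerate_cons, List.find?_cons]
      by_cases hdig : pvDig cs k = true
      · have h1 : PySem.Chars.isdigit cs[k] = true := by rwa [pvDig_eq hk] at hdig
        simp [h1, pvFirst_found hdig]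
      · rw [Bool.not_eq_true] at hdig
        have h1 : PySem.Chars.isdigit cs[k] = false := by rwa [pvDig_eq hk] at hdig
        simp only [h1, Bool.false_eq_true, if_false]
        rw [show (k : Int) + 1 = ((k + 1 : Nat) : Int) by omega,
            ih (k + 1) (by omega), ← pvFirst_skip hdig]

lemma pvAltLast (cs : List Char) : ∀ (j : Nat), j ≤ cs.length →
    (PySem.List.pyRange ((j : Int) - 1) (-1) (-1)).find?
        (fun i => (PySem.List.pyGet? cs i).any PySem.Chars.isdigit)
      = (pvLast cs j).map (fun j => (j : Int)) := by
  intro j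
  induction j with
  | zero =>
      intro _
      rw [show ((0 : Nat) : Int) - 1 = (-1 : Int) by omega,
          PySem.List.pyRange_neg_one_eq_nil (by omega)]
      rfl
  | succ j ih =>
      intro hj
      have hjn : j < cs.length := by omega
      rw [show ((j + 1 : Nat) : Int) - 1 = ((j : Nat) : Int) by omega,
          PySem.List.pyRange_neg_one_cons (by omega), List.find?_cons]
      have hget : PySem.List.pyGet? cs ((j : Nat) : Int) = some cs[j] := by simp [hjn]
      by_cases hdig : pvDig cs j = true
      · have h1 : PySem.Chars.isdigit cs[j] = true := by rwa [pvDig_eq hjn] at hdig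
        simp [hget, h1, pvLast_found hdig]
      · rw [Bool.not_eq_true] at hdig
        have h1 : PySem.Chars.isdigit cs[j] = false := by rwa [pvDig_eq hjn] at hdig
        simp only [hget, Option.any_some, h1, Bool.false_eq_true, if_false]
        rw [pvLast_skip hdig]
        exact ih (by omega)

-- ===== VERDICT (by name: the statement is the Claim_ definition above) =====
theorem get_index_of_numbers_spec : Claim_equal_get_index_of_numbers := by
  intro line _
  unfold Spec_get_index_of_numbers
  unfold get_index_of_numbers get_index_of_numbers_alt
  have hlen : (PySem.Str.len line : Int) = (line.toList.length : Int) := by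
    simp [PySem.Str.len_eq]
  rw [hlen]
  have h0 := pvPhase0 line.toList line.toList.length 0 (by omega) (by omega)
        (fun i hi => absurd hi (by omega))
        (fun i hi => by
          by_contra hd
          simp only [Bool.not_eq_false] at hd
          exact absurd (pvDig_lt hd) (by omega))
  simp only [Nat.cast_zero, sub_zero] at h0
  rw [h0]
  have h1 := pvAltFirst line.toList line.toList.length 0 (by omega)
  simp only [List.drop_zero, Nat.cast_zero] at h1
  have h2 := pvAltLast line.toList line.toList.length (le_refl _)
  rw [← h1, ← h2]
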